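-- pv_equiv track=rewrite | github.com/rinnakk/vicuna-13b-delta-finetuned-langchain-MRKL | data/format.py | process
-- ===== SOURCE A (Python) =====
-- def process(example):
--     example = example.strip()
--     if not example.startswith("Question"):
--         return None
--     lines = example.split("\n")
--     prelines = ""
--     instances = []
--     for i,line in enumerate(lines):
--         if line.startswith("Thought:"):
--             output = ""
--             input = ""
--             if "previous steps:" not in line:
--                 output = line[8:].lstrip()
--             output+="\n"+"\n".join(lines[i+1:])
--             if "previous steps:" in line:
--                 input = prelines+line
--             else:
--                 input = prelines+"Thought:"
--             input,output = input.strip(),output.strip()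
--             instances.append([input,output])
--         prelines += line+'\n'
--     return instances
-- ===== SOURCE B (Python) =====
-- def process(example):
--     example = example.strip()
--     if not example.startswith("Question"):
--         return None
--     lines = example.split("\n")
--     hits = [(i, ln) for i, ln in enumerate(lines) if ln.startswith("Thought:")]
--     instances = []
--     for i, line in hits:
--         suffix = "\n".join(lines[i + 1:])
--         if "previous steps:" in line:
--             inp = "\n".join(lines[:i + 1])
--             out = "\n" + suffix
--         else:
--             inp = "\n".join(lines[:i] + ["Thought:"])
--             out = line[8:].lstrip() + "\n" + suffix
--         instances.append([inp.strip(), out.strip()])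
--     return instances
-- ===== Notes on version B (the rewrite author's own statement) =====
-- stated objective: alternative
-- what changed: B separates locating the Thought marker lines (one enumerate+filter pass) from building each instance, computing each prefix/suffix directly as a newline-join of list slices instead of maintaining A's running prelines accumulator across one fused loop.
import Mathlib
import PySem

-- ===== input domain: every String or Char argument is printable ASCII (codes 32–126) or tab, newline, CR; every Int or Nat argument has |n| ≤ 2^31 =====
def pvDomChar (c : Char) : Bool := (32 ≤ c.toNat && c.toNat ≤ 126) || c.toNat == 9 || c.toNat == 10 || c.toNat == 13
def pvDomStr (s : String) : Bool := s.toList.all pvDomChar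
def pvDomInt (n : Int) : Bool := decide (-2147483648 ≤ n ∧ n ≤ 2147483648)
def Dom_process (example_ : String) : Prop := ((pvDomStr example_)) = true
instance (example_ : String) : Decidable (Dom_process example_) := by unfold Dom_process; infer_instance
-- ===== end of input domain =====

-- B separates locating the 'Thought:' lines from building each instance (join of slices
-- instead of A's running prelines accumulator); same results, no speed claim.


-- ===== PORT A =====
-- A's loop over enumerate(lines): the remaining tail `rest` is exactly lines[i+1:],
-- `pre` is the running prelines accumulator, `acc` the instances list.
def pvLoopA : List String → String → List (List String) → List (List String)
  | [], _, acc => acc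
  | line :: rest, pre, acc =>
    let acc' :=
      if PySem.Str.startswith line "Thought:" then
        let out0 := if PySem.Str.isIn "previous steps:" line = false then
            PySem.Str.lstrip (PySem.Str.slice line (some 8) none) else ""
        let output := out0 ++ "\n" ++ PySem.Str.join "\n" rest
        let input := if PySem.Str.isIn "previous steps:" line then pre ++ line else pre ++ "Thought:"
        acc ++ [[PySem.Str.strip input, PySem.Str.strip output]]
      else acc
    pvLoopA rest (pre ++ line ++ "\n") acc'

def process (example_ : String) : Option (List (List String)) :=
  let ex := PySem.Str.strip example_
  if ¬ (PySem.Str.startswith ex "Question") then none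
  else
    -- exact: ex.split("\n") with nonempty separator = Chars.splitOn on the code points
    let lines := (PySem.Chars.splitOn ex.toList "\n".toList).map String.ofList
    some (pvLoopA lines "" [])

-- ===== PORT B =====
def pvInstB (lines : List String) (p : Int × String) : List String :=
  let i := p.1
  let line := p.2
  let suffix := PySem.Str.join "\n" (PySem.List.slice lines (some (i + 1)) none)
  if PySem.Str.isIn "previous steps:" line then
    [PySem.Str.strip (PySem.Str.join "\n" (PySem.List.slice lines none (some (i + 1)))),
     PySem.Str.strip ("\n" ++ suffix)]
  else
    [PySem.Str.strip (PySem.Str.join "\n" (PySem.List.slice lines none (some i) ++ ["Thought:"])),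
     PySem.Str.strip (PySem.Str.lstrip (PySem.Str.slice line (some 8) none) ++ "\n" ++ suffix)]

def process_alt (example_ : String) : Option (List (List String)) :=
  let ex := PySem.Str.strip example_
  if ¬ (PySem.Str.startswith ex "Question") then none
  else
    -- exact: ex.split("\n") with nonempty separator = Chars.splitOn on the code points
    let lines := (PySem.Chars.splitOn ex.toList "\n".toList).map String.ofList
    let hits := (PySem.List.enumerate lines).filter (fun p => PySem.Str.startswith p.2 "Thought:")
    some (hits.map (pvInstB lines))

-- ===== PRECONDITION & SPEC =====
def Spec_process (example_ : String) (out : Option (List (List String))) : Prop := out = process_alt example_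
instance (example_ : String) (out : Option (List (List String))) : Decidable (Spec_process example_ out) := by unfold Spec_process; infer_instance

-- ===== CLAIM (what is proved, stated in full; the proofs are below) =====
def Claim_equal_process : Prop := ∀ (example_ : String), Dom_process example_ → Spec_process example_ (process example_)

-- ===== LEMMAS AND PROOFS =====

-- prelines after processing `done` lines: each line followed by '\n'
def pvJoinNl : List String → String
  | [] => ""
  | l :: ls => l ++ "\n" ++ pvJoinNl ls

theorem pvJoinNl_append_singleton (ds : List String) (l : String) :
    pvJoinNl (ds ++ [l]) = pvJoinNl ds ++ l ++ "\n" := by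
  induction ds with
  | nil => simp [pvJoinNl]
  | cons d ds ih => simp [pvJoinNl, ih, String.append_assoc]

theorem pv_join_cons_ne_nil (a : String) (l : List String) (h : l ≠ []) :
    PySem.Str.join "\n" (a :: l) = a ++ "\n" ++ PySem.Str.join "\n" l := by
  cases l with
  | nil => exact absurd rfl h
  | cons b bs =>
    apply String.toList_inj.mp
    simp [PySem.Str.toList_join, PySem.Chars.join_cons_cons]

theorem pv_joinNl_append (ds : List String) (s : String) :
    pvJoinNl ds ++ s = PySem.Str.join "\n" (ds ++ [s]) := by
  induction ds with
  | nil =>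
    apply String.toList_inj.mp
    simp [pvJoinNl, PySem.Str.toList_join, PySem.Chars.join_singleton]
  | cons d ds ih =>
    have h : PySem.Str.join "\n" (d :: (ds ++ [s])) = d ++ "\n" ++ PySem.Str.join "\n" (ds ++ [s]) :=
      pv_join_cons_ne_nil d (ds ++ [s]) (by simp)
    simp only [List.cons_append, h, ← ih, pvJoinNl, String.append_assoc]

theorem pv_inst_eq (done rest : List String) (line : String) :
    pvInstB (done ++ line :: rest) ((done.length : Int), line)
      = [PySem.Str.strip (if PySem.Str.isIn "previous steps:" line then pvJoinNl done ++ line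
            else pvJoinNl done ++ "Thought:"),
         PySem.Str.strip ((if PySem.Str.isIn "previous steps:" line = false then
              PySem.Str.lstrip (PySem.Str.slice line (some 8) none) else "")
            ++ "\n" ++ PySem.Str.join "\n" rest)] := by
  have hdrop : (done ++ line :: rest).drop (done.length + 1) = rest := by
    have h1 : done ++ line :: rest = (done ++ [line]) ++ rest := by simp
    have hl : (done ++ [line]).length = done.length + 1 := by simp
    rw [h1, ← hl, List.drop_left]
  have htake1 : (done ++ line :: rest).take (done.length + 1) = done ++ [line] := by
    have h1 : done ++ line :: rest = (done ++ [line]) ++ rest := by simp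
    have hl : (done ++ [line]).length = done.length + 1 := by simp
    rw [h1, ← hl, List.take_left]
  have htake0 : (done ++ line :: rest).take done.length = done := by
    simp
  have hcast : ((done.length : Int) + 1) = (((done.length + 1 : Nat) : Int)) := by push_cast; ring
  have hsliceFrom : PySem.List.slice (done ++ line :: rest) (some ((done.length : Int) + 1)) none = rest := by
    rw [hcast, PySem.List.slice_from_natCast, hdrop]
  have hsliceTo1 : PySem.List.slice (done ++ line :: rest) none (some ((done.length : Int) + 1)) = done ++ [line] := by
    rw [hcast, PySem.List.slice_to_natCast, htake1]
  have hsliceTo0 : PySem.List.slice (done ++ line :: rest) none (some ((done.length : Int))) = done := by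
    rw [PySem.List.slice_to_natCast, htake0]
  simp only [pvInstB, hsliceFrom, hsliceTo1, hsliceTo0]
  by_cases hps : PySem.Str.isIn "previous steps:" line
  · simp only [hps, if_true, Bool.true_eq_false, if_false]
    rw [← pv_joinNl_append, String.empty_append]
  · simp only [Bool.not_eq_true] at hps
    simp only [hps, Bool.false_eq_true, if_false, if_true]
    rw [← pv_joinNl_append]

theorem pv_loop_eq (rest done : List String) (acc : List (List String)) :
    pvLoopA rest (pvJoinNl done) acc
      = acc ++ (((PySem.List.enumerate rest (done.length : Int)).filter
            (fun p => PySem.Str.startswith p.2 "Thought:")).map (pvInstB (done ++ rest))) := by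
  induction rest generalizing done acc with
  | nil => simp [pvLoopA, PySem.List.enumerate]
  | cons line rest ih =>
    have hpre : pvJoinNl done ++ line ++ "\n" = pvJoinNl (done ++ [line]) :=
      (pvJoinNl_append_singleton done line).symm
    have hlen : (done.length : Int) + 1 = ((done ++ [line]).length : Int) := by simp
    rw [pvLoopA, PySem.List.enumerate_cons]
    by_cases hst : PySem.Str.startswith line "Thought:"
    · simp only [hst, if_true, List.filter_cons, List.map_cons, hpre]
      rw [hlen, ih (done ++ [line])]
      rw [pv_inst_eq done rest line]
      simp [List.append_assoc]
    · simp only [hst, Bool.false_eq_true, if_false, List.filter_cons, hpre]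
      rw [hlen, ih (done ++ [line])]
      simp [List.append_assoc]

-- ===== VERDICT (by name: the statement is the Claim_ definition above) =====
theorem process_spec : Claim_equal_process := by
  intro example_ _
  unfold Spec_process process process_alt
  by_cases h : PySem.Chars.startswith (PySem.Chars.strip example_.toList) ['Q','u','e','s','t','i','o','n']
  · have hloop := pv_loop_eq
      ((PySem.Chars.splitOn (PySem.Str.strip example_).toList "\n".toList).map String.ofList) [] []
    simp only [pvJoinNl, List.nil_append, List.length_nil, Nat.cast_zero] at hloop
    simp at hloop
    simp [h, hloop]
  · simp only [Bool.not_eq_true] at h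
    simp [h]
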